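-- pv_equiv track=rewrite | github.com/hayden1126/AdventOfCodeSchool | 2023/day7/PDR_part1.py | rankString
-- ===== SOURCE A (Python) =====
-- def rankString(hand):
-- 	map = {'A': 'a', 'K': 'b', 'Q': 'c', 'J': 'd', 'T': 'e', '9': 'f', '8': 'g', '7': 'h', '6': 'i', '5': 'j', '4': 'k', '3': 'l', '2': 'm'}
--
-- 	rankString = ''
-- 	for character in hand:
-- 		rankString += map[character]
--
-- 	counts = [rankString.count(character) for character in rankString]
--
-- 	if max(counts) == 5:
-- 		rankString = 'a' + rankString
-- 	elif max(counts) == 4: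
-- 		rankString = 'b' + rankString
-- 	elif 3 in counts and 2 in counts:
-- 		rankString = 'c' + rankString
-- 	elif 3 in counts:
-- 		rankString = 'd' + rankString
-- 	elif counts.count(2) == 4:
-- 		rankString = 'e' + rankString
-- 	elif counts.count(2) == 2:
-- 		rankString = 'f' + rankString
-- 	elif counts.count(1) == 5:
-- 		rankString = 'g' + rankString
--
-- 	return rankString
-- ===== SOURCE B (Python) =====
-- def rankString(hand):
--     # Rank letter by arithmetic on the card's position in the order string.
--     order = 'AKQJT98765432'
--     body = ''.join(chr(ord('a') + order.index(c)) for c in hand)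
--     # Sort the translated hand so equal cards are adjacent, then run-length
--     # encode it in one scan: runs holds one count per distinct card.
--     runs = []
--     prev = None
--     for d in sorted(body):
--         if d == prev:
--             runs[-1] += 1
--         else:
--             runs.append(1)
--             prev = d
--     m = max(runs, default=0)
--     # First-true lookup in a data table instead of a branch cascade.
--     table = [(m == 5, 'a'), (m == 4, 'b'),
--              (3 in runs and 2 in runs, 'c'), (3 in runs, 'd'),
--              (runs.count(2) == 2, 'e'), (runs.count(2) == 1, 'f'),
--              (runs.count(1) == 5, 'g')]
--     prefix = next((letter for ok, letter in table if ok), '')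
--     return prefix + body
-- ===== Notes on version B (the rewrite author's own statement) =====
-- stated objective: faster
-- what changed: B translates cards arithmetically from their position in an order string, then sorts the translated hand and run-length encodes it in one scan (one count per distinct card, replacing A's per-position list of repeated str.count scans, with thresholds halved accordingly), and picks the prefix by a first-true lookup in a data table instead of an if/elif cascade.
import Mathlib
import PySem

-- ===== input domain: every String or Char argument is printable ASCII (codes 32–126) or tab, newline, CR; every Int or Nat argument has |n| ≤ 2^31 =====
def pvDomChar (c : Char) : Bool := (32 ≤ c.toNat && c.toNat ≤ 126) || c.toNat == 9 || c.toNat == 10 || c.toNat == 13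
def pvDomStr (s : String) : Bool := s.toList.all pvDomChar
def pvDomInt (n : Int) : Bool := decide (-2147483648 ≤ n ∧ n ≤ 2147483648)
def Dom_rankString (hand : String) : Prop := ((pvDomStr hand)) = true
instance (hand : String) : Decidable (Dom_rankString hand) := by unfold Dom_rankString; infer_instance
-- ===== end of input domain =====

-- B replaces A's quadratic per-position str.count list by sorting the translated hand and
-- run-length encoding it in one scan, translating cards arithmetically from their position
-- in an order string and choosing the prefix by a first-true table lookup.

-- ===== PORT A =====
-- the card → rank-letter dict literal of A
def pvCardMap : PySem.Dict Char Char :=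
  PySem.Dict.ofList [('A','a'),('K','b'),('Q','c'),('J','d'),('T','e'),('9','f'),('8','g'),
                     ('7','h'),('6','i'),('5','j'),('4','k'),('3','l'),('2','m')]

-- `map[character]` raises KeyError for a card outside the map and `max([])` raises
-- ValueError on the empty hand; both are excluded by Pre_ below (the port reads the
-- lookup as getD ' ' and returns the then-empty string in the `none` arm of max).
def rankString (hand : String) : String :=
  let t : List Char := hand.toList.foldl (fun acc c => acc ++ [(pvCardMap.get? c).getD ' ']) []
  let counts : List Int := t.map (fun c => ((PySem.Chars.count t [c] : Nat) : Int))
  match PySem.List.max? counts (fun x => x) with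
  | none => String.ofList t
  | some m =>
    if m = 5 then String.ofList ('a' :: t)
    else if m = 4 then String.ofList ('b' :: t)
    else if 3 ∈ counts ∧ 2 ∈ counts then String.ofList ('c' :: t)
    else if 3 ∈ counts then String.ofList ('d' :: t)
    else if counts.count 2 = 4 then String.ofList ('e' :: t)
    else if counts.count 2 = 2 then String.ofList ('f' :: t)
    else if counts.count 1 = 5 then String.ofList ('g' :: t)
    else String.ofList t

-- ===== PORT B =====
-- the order string 'AKQJT98765432' of B ('order.index(c)' raises ValueError off Pre_;
-- the port reads it as index? … getD 0)
def pvOrder : List Char := ['A','K','Q','J','T','9','8','7','6','5','4','3','2']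

-- runs[-1] += 1
def pvModLast : List Int → List Int
  | [] => []
  | [x] => [x + 1]
  | x :: y :: xs => x :: pvModLast (y :: xs)

-- one iteration of B's run-length loop; state = (runs, prev)
def pvStep (p : List Int × Option Char) (d : Char) : List Int × Option Char :=
  if p.2 = some d then (pvModLast p.1, p.2) else (p.1 ++ [1], some d)

def rankString_alt (hand : String) : String :=
  let body : List Char :=
    hand.toList.map (fun c => Char.ofNat ('a'.toNat + ((PySem.List.index? pvOrder c).getD 0)))
  let runs : List Int := ((PySem.List.sorted body (fun x => x) false).foldl pvStep ([], none)).1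
  -- max(runs, default=0)
  let m : Int := match PySem.List.max? runs (fun x => x) with | some v => v | none => 0
  let table : List (Bool × Char) :=
    [(decide (m = 5), 'a'), (decide (m = 4), 'b'),
     (decide ((3:Int) ∈ runs) && decide ((2:Int) ∈ runs), 'c'),
     (decide ((3:Int) ∈ runs), 'd'),
     (decide (runs.count 2 = 2), 'e'), (decide (runs.count 2 = 1), 'f'),
     (decide (runs.count 1 = 5), 'g')]
  -- next((letter for ok, letter in table if ok), '')
  match table.find? (fun p => p.1) with
  | some p => String.ofList (p.2 :: body)
  | none => String.ofList body

-- ===== PRECONDITION & SPEC =====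
-- Pre_ excludes exactly the inputs where A raises: the empty hand (ValueError from max([]))
-- and hands with a character outside the 13 cards (KeyError).
def Pre_rankString (hand : String) : Prop :=
  hand.toList ≠ [] ∧ hand.toList.all (fun c => pvOrder.contains c) = true
instance (hand : String) : Decidable (Pre_rankString hand) := by unfold Pre_rankString; infer_instance
def pvWitness_rankString : String := "32T3K"
def Spec_rankString (hand : String) (out : String) : Prop := out = rankString_alt hand
instance (hand : String) (out : String) : Decidable (Spec_rankString hand out) := by unfold Spec_rankString; infer_instance

-- ===== CLAIM (what is proved, stated in full; the proofs are below) =====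
def Claim_equal_rankString : Prop := ∀ (hand : String), Dom_rankString hand → Pre_rankString hand → Spec_rankString hand (rankString hand)

-- ===== LEMMAS AND PROOFS =====

-- the two per-character translations agree on the 13 cards
theorem pv_char_eq (c : Char) (h : c ∈ pvOrder) :
    (pvCardMap.get? c).getD ' ' = Char.ofNat ('a'.toNat + ((PySem.List.index? pvOrder c).getD 0)) := by
  simp only [pvOrder, List.mem_cons, List.not_mem_nil, or_false] at h
  rcases h with rfl|rfl|rfl|rfl|rfl|rfl|rfl|rfl|rfl|rfl|rfl|rfl|rfl <;> decide

-- Python's s.count(ch) with a single-character needle is the character count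
theorem pv_go_count (c : Char) : ∀ (fuel : Nat) (l : List Char) (acc : Nat), l.length ≤ fuel →
    PySem.Chars.count.go [c] fuel l acc = acc + l.count c := by
  intro fuel
  induction fuel with
  | zero => intro l acc h; rw [Nat.le_zero, List.length_eq_zero_iff] at h; subst h
            simp [PySem.Chars.count.go]
  | succ n ih =>
    intro l acc h
    cases l with
    | nil => simp [PySem.Chars.count.go]
    | cons x t =>
      rw [PySem.Chars.count.go]
      by_cases hx : x = c
      · subst hx
        simp only [List.isPrefixOf, BEq.rfl, Bool.true_and, if_pos]
        simp [ih t (acc+1) (by simpa using h)]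
        omega
      · simp [List.isPrefixOf, hx, ih t acc (by simpa using h), Ne.symm hx]

theorem pv_chars_count_singleton (t : List Char) (c : Char) : PySem.Chars.count t [c] = t.count c := by
  simp [PySem.Chars.count, pv_go_count c t.length t 0 le_rfl]

theorem pv_sum_shift (p : Char → Bool) (r : List Char) (x : Char) :
    ∀ (d : List Char), d.Nodup → x ∈ d →
    (d.map (fun c => if p c then r.count c + (if x == c then 1 else 0) else 0)).sum
      = (d.map (fun c => if p c then r.count c else 0)).sum + (if p x then 1 else 0) := by
  intro d
  induction d with
  | nil => intro _ hx; exact absurd hx (List.not_mem_nil)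
  | cons y ds ih =>
    intro hnd hx
    by_cases hxy : x = y
    · subst hxy
      have hnot : x ∉ ds := (List.nodup_cons.mp hnd).1
      have hmap : (ds.map (fun c => if p c then r.count c + (if x == c then 1 else 0) else 0))
           = ds.map (fun c => if p c then r.count c else 0) := by
        apply List.map_congr_left
        intro c hc
        have hne : x ≠ c := fun h => hnot (h ▸ hc)
        simp [hne]
      simp only [List.map_cons, List.sum_cons, hmap, BEq.rfl, if_true]
      by_cases hp : p x <;> first | (simp [hp]; omega) | simp [hp]
    · have hxds : x ∈ ds := (List.mem_cons.mp hx).resolve_left hxy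
      have hbeq : (x == y) = false := by simp [hxy]
      have hih := ih (List.nodup_cons.mp hnd).2 hxds
      simp only [List.map_cons, List.sum_cons, hbeq, Bool.false_eq_true, if_false, Nat.add_zero, hih]
      omega

theorem pv_countP_eq_sum (p : Char → Bool) :
    ∀ (t d : List Char), d.Nodup → (∀ c ∈ t, c ∈ d) →
    t.countP p = (d.map (fun c => if p c then t.count c else 0)).sum := by
  intro t
  induction t with
  | nil => intro d _ _; simp
  | cons x r ih =>
    intro d hnd hsub
    have hx : x ∈ d := hsub x List.mem_cons_self
    have hr : ∀ c ∈ r, c ∈ d := fun c hc => hsub c (List.mem_cons_of_mem x hc)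
    have hmap : (d.map (fun c => if p c then (x :: r).count c else 0))
        = d.map (fun c => if p c then r.count c + (if x == c then 1 else 0) else 0) := by
      apply List.map_congr_left
      intro c _
      by_cases h : c = x <;> simp [List.count_cons, h]
    rw [List.countP_cons, ih d hnd hr, hmap, pv_sum_shift p r x d hnd hx]

theorem pv_sum_ite_const (q : Char → Bool) (n : Nat) (d : List Char) :
    (d.map (fun c => if q c then n else 0)).sum = n * d.countP q := by
  induction d with
  | nil => simp
  | cons y ds ih =>
    simp only [List.map_cons, List.sum_cons, List.countP_cons, ih]
    by_cases h : q y <;> first | (simp [h]; ring) | simp [h]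

theorem pv_count_counts (t : List Char) (n : Nat) :
    (t.map (fun c => ((t.count c : Nat) : Int))).count (n : Int)
      = n * ((PySem.List.dedup t).map (fun c => ((t.count c : Nat) : Int))).count (n : Int) := by
  have hk : ∀ (l : List Char), (l.map (fun c => ((t.count c : Nat) : Int))).count (n : Int)
      = l.countP (fun c => t.count c == n) := by
    intro l
    rw [List.count, List.countP_map]
    apply List.countP_congr
    intro c _
    simp [Function.comp, Nat.cast_inj]
  rw [hk t, hk (PySem.List.dedup t)]
  rw [pv_countP_eq_sum (fun c => t.count c == n) t (PySem.List.dedup t)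
        (PySem.List.nodup_dedup t) (fun c hc => (PySem.List.mem_dedup t c).mpr hc)]
  have hmap : ((PySem.List.dedup t).map (fun c => if t.count c == n then t.count c else 0))
       = (PySem.List.dedup t).map (fun c => if t.count c == n then n else 0) := by
    apply List.map_congr_left
    intro c _
    by_cases h : t.count c = n <;> simp [h]
  rw [hmap, pv_sum_ite_const]

theorem pv_mem_map_dedup (t : List Char) (k : Char → Int) (v : Int) :
    v ∈ t.map k ↔ v ∈ (PySem.List.dedup t).map k := by
  simp [List.mem_map]

theorem pv_max?_congr (xs ys : List Int) (h : ∀ v, v ∈ xs ↔ v ∈ ys) :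
    PySem.List.max? xs (fun x => x) = PySem.List.max? ys (fun x => x) := by
  cases hx : PySem.List.max? xs (fun x => x) with
  | none =>
    rw [PySem.List.max?_eq_none_iff] at hx
    cases hy : PySem.List.max? ys (fun x => x) with
    | none => rfl
    | some m => exfalso
                have hm := PySem.List.max?_mem hy
                rw [← h, hx] at hm; exact (List.not_mem_nil hm)
  | some m =>
    cases hy : PySem.List.max? ys (fun x => x) with
    | none => rw [PySem.List.max?_eq_none_iff] at hy
              have hm := PySem.List.max?_mem hx
              rw [h, hy] at hm; exact absurd hm (List.not_mem_nil)
    | some m' =>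
      have h1 := PySem.List.max?_isMax hx
      have h2 := PySem.List.max?_isMax hy
      have hm : m ∈ ys := (h m).mp (PySem.List.max?_mem hx)
      have hm' : m' ∈ xs := (h m').mpr (PySem.List.max?_mem hy)
      exact congrArg some (le_antisymm (h2 m hm) (h1 m' hm'))

-- ----- B-side: the run-length loop over a sorted list yields the per-distinct-card counts -----

theorem pv_modLast_ne_nil (x : List Int) (h : x ≠ []) : pvModLast x ≠ [] := by
  match x with
  | [a] => simp [pvModLast]
  | a :: b :: xs => simp [pvModLast]

theorem pv_modLast_append (rs x : List Int) (h : x ≠ []) :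
    pvModLast (rs ++ x) = rs ++ pvModLast x := by
  induction rs with
  | nil => rfl
  | cons a rs ih =>
    cases hrx : rs ++ x with
    | nil => exact absurd (List.append_eq_nil_iff.mp hrx).2 h
    | cons b l =>
      rw [List.cons_append, hrx, pvModLast, ← hrx, ih, List.cons_append]

theorem pv_foldl_step_shift (l : List Char) : ∀ (rs x : List Int) (p : Option Char), x ≠ [] →
    l.foldl pvStep (rs ++ x, p) = (rs ++ (l.foldl pvStep (x, p)).1, (l.foldl pvStep (x, p)).2) := by
  induction l with
  | nil => intro rs x p _; rfl
  | cons d l ih =>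
    intro rs x p hx
    simp only [List.foldl_cons]
    by_cases hp : p = some d
    · simp only [pvStep, hp, if_true]
      rw [pv_modLast_append rs x hx]
      exact ih rs (pvModLast x) (some d) (pv_modLast_ne_nil x hx)
    · simp only [pvStep, if_neg hp, List.append_assoc]
      exact ih rs (x ++ [1]) (some d) (by simp)

theorem pv_foldl_replicate (n : Nat) (h : Char) : ∀ (k : Int),
    (List.replicate n h).foldl pvStep ([k], some h) = ([k + n], some h) := by
  induction n with
  | zero => intro k; simp
  | succ m ih =>
    intro k
    simp only [List.replicate_succ, List.foldl_cons]
    rw [show pvStep ([k], some h) h = ([k + 1], some h) from by simp [pvStep, pvModLast]]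
    rw [ih (k + 1)]
    congr 2
    push_cast
    ring

theorem pv_fresh_shift (r : List Char) (rs : List Int) (h : Char) (hh : h ∉ r) :
    (r.foldl pvStep (rs, some h)).1 = rs ++ (r.foldl pvStep ([], none)).1 := by
  cases r with
  | nil => simp
  | cons r0 r' =>
    have hne : h ≠ r0 := fun he => hh (he ▸ List.mem_cons_self)
    have h1 : pvStep (rs, some h) r0 = (rs ++ [1], some r0) := by simp [pvStep, hne]
    have h2 : pvStep ([], none) r0 = ([1], some r0) := by simp [pvStep]
    simp only [List.foldl_cons, h1, h2]
    rw [pv_foldl_step_shift r' rs [1] (some r0) (by simp)]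

theorem pv_foldl_add_replicate (n : Nat) (h : Char) (s : List Char) (hs : h ∈ s) :
    (List.replicate n h).foldl PySem.Set.add s = s := by
  induction n with
  | zero => rfl
  | succ m ih =>
    simp only [List.replicate_succ, List.foldl_cons]
    rw [show PySem.Set.add s h = s from by simp [PySem.Set.add, hs], ih]

theorem pv_foldl_add_cons (r : List Char) : ∀ (s : List Char) (h : Char), h ∉ r →
    r.foldl PySem.Set.add (h :: s) = h :: r.foldl PySem.Set.add s := by
  induction r with
  | nil => intro s h _; rfl
  | cons c r ih =>
    intro s h hh
    have hne : h ≠ c := fun he => hh (he ▸ List.mem_cons_self)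
    have hstep : PySem.Set.add (h :: s) c = h :: PySem.Set.add s c := by
      have hc : PySem.Set.contains (h :: s) c = PySem.Set.contains s c := by
        simp [PySem.Set.contains, Ne.symm hne]
      simp only [PySem.Set.add, hc]
      split <;> simp
    simp only [List.foldl_cons, hstep]
    exact ih (PySem.Set.add s c) h (fun hm => hh (List.mem_cons_of_mem c hm))

-- a nonempty dropWhile starts with an element failing the predicate
theorem pv_dropWhile_head_not (p : Char → Bool) (a : Char) :
    ∀ (l r : List Char), List.dropWhile p l = a :: r → p a = false := by
  intro l
  induction l with
  | nil => intro r h; simp at h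
  | cons x xs ih =>
    intro r h
    rw [List.dropWhile_cons] at h
    split at h
    · exact ih r h
    · cases h; simp_all

theorem pv_runs_sorted : ∀ (n : Nat) (l : List Char), l.length ≤ n → l.Pairwise (· ≤ ·) →
    (l.foldl pvStep ([], none)).1
      = (PySem.List.dedup l).map (fun c => ((l.count c : Nat) : Int)) := by
  intro n
  induction n with
  | zero => intro l hl _; rw [Nat.le_zero, List.length_eq_zero_iff] at hl; subst hl; rfl
  | succ n ih =>
    intro l hl hp
    cases l with
    | nil => rfl
    | cons h t =>
      have hpt : ∀ x ∈ t, h ≤ x := (List.pairwise_cons.mp hp).1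
      have hptt : t.Pairwise (· ≤ ·) := (List.pairwise_cons.mp hp).2
      have htkr : t.takeWhile (fun c => c == h) ++ t.dropWhile (fun c => c == h) = t :=
        List.takeWhile_append_dropWhile
      set k := t.takeWhile (fun c => c == h) with hkdef
      set r := t.dropWhile (fun c => c == h) with hrdef
      have hkrep : k = List.replicate k.length h :=
        List.eq_replicate_of_mem (fun b hb => by simpa using List.mem_takeWhile_imp hb)
      have hhr : h ∉ r := by
        intro hmem
        cases hr2 : r with
        | nil => rw [hr2] at hmem; exact absurd hmem (List.not_mem_nil)
        | cons r0 r'' =>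
          have hr0 : (r0 == h) = false := pv_dropWhile_head_not _ r0 t r'' (by rw [← hrdef, hr2])
          have hr0h : r0 ≠ h := by simpa using hr0
          have hr0t : r0 ∈ t := by
            rw [← htkr, hr2]; exact List.mem_append_right _ List.mem_cons_self
          have hlt : h < r0 := lt_of_le_of_ne (hpt r0 hr0t) (Ne.symm hr0h)
          have hpr2 : (r0 :: r'').Pairwise (· ≤ ·) := by
            rw [← hr2]; exact List.Pairwise.sublist (List.dropWhile_sublist _) hptt
          rw [hr2] at hmem
          rcases List.mem_cons.mp hmem with he | hmem'
          · exact hr0h he.symm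
          · exact absurd ((List.pairwise_cons.mp hpr2).1 h hmem') (not_le_of_gt hlt)
      have hpr : r.Pairwise (· ≤ ·) := List.Pairwise.sublist (List.dropWhile_sublist _) hptt
      have hlr : r.length ≤ n := by
        have h1 : k.length + r.length = t.length := by rw [← List.length_append, htkr]
        simp only [List.length_cons] at hl
        omega
      have hihr := ih r hlr hpr
      -- left side: run-length loop
      have hLHS : ((h :: t).foldl pvStep ([], none)).1
          = ((1 : Int) + k.length) :: (r.foldl pvStep ([], none)).1 := by
        rw [show ((h :: t).foldl pvStep ([], none)) = (t.foldl pvStep ([1], some h)) from by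
              simp [pvStep]]
        rw [← htkr, List.foldl_append]
        rw [show k.foldl pvStep ([1], some h) = ([1 + (k.length : Int)], some h) from by
              rw [hkrep] at *; rw [List.length_replicate] at *
              exact pv_foldl_replicate _ h 1]
        exact pv_fresh_shift r [1 + (k.length : Int)] h hhr
      -- right side: dedup and counts
      have hded : PySem.List.dedup (h :: t) = h :: PySem.List.dedup r := by
        rw [PySem.List.dedup_eq_ofList, PySem.List.dedup_eq_ofList,
            PySem.Set.ofList_eq_foldl, PySem.Set.ofList_eq_foldl]
        rw [← htkr, List.foldl_cons, List.foldl_append]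
        rw [show PySem.Set.add [] h = [h] from rfl]
        rw [hkrep, pv_foldl_add_replicate k.length h [h] List.mem_cons_self]
        exact pv_foldl_add_cons r [] h hhr
      have hcnth : (h :: t).count h = 1 + k.length := by
        rw [← htkr, ← List.cons_append, List.count_append, List.count_cons_self,
            hkrep, List.count_replicate]
        simp [List.count_eq_zero.mpr hhr]
        omega
      have hcntr : ∀ c ∈ PySem.List.dedup r, (h :: t).count c = r.count c := by
        intro c hc
        have hcr : c ∈ r := (PySem.List.mem_dedup r c).mp hc
        have hch : c ≠ h := fun he => hhr (he ▸ hcr)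
        rw [← htkr, ← List.cons_append, List.count_append, List.count_cons_of_ne (Ne.symm hch),
            hkrep, List.count_replicate]
        simp [Ne.symm hch]
      rw [hLHS, hihr, hded, List.map_cons]
      congr 1
      · rw [hcnth]; push_cast; ring
      · exact (List.map_congr_left (fun c hc => by rw [hcntr c hc])).symm

-- ===== VERDICT (by name: the statement is the Claim_ definition above) =====
theorem rankString_spec : Claim_equal_rankString := by
  intro hand _ hpre
  obtain ⟨hne, hmemb⟩ := hpre
  have hmem : ∀ c ∈ hand.toList, c ∈ pvOrder := by
    intro c hc
    simpa using List.all_eq_true.mp hmemb c hc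
  unfold Spec_rankString rankString rankString_alt
  simp only [PySem.List.foldl_append_singleton_eq_map, List.nil_append, pv_chars_count_singleton]
  rw [List.map_congr_left (fun c hc => (pv_char_eq c (hmem c hc)).symm)]
  set t := hand.toList.map (fun c => (pvCardMap.get? c).getD ' ') with ht
  set s := PySem.List.sorted t (fun x => x) false with hs
  set runs := (s.foldl pvStep ([], none)).1 with hrunsdef
  set counts := t.map (fun c => ((t.count c : Nat) : Int)) with hcounts
  have hsp : s.Perm t := PySem.List.sorted_perm t (fun x => x) false
  have hpair : s.Pairwise (· ≤ ·) := PySem.List.sorted_pairwise t (fun x => x)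
  have hruns : runs = (PySem.List.dedup s).map (fun c => ((t.count c : Nat) : Int)) := by
    rw [hrunsdef, pv_runs_sorted s.length s le_rfl hpair]
    exact List.map_congr_left (fun c _ => by rw [hsp.count_eq c])
  have hdperm : (PySem.List.dedup s).Perm (PySem.List.dedup t) := by
    rw [List.perm_ext_iff_of_nodup (PySem.List.nodup_dedup s) (PySem.List.nodup_dedup t)]
    intro a
    rw [PySem.List.mem_dedup, PySem.List.mem_dedup, PySem.List.mem_sorted]
  have hrp : runs.Perm ((PySem.List.dedup t).map (fun c => ((t.count c : Nat) : Int))) := by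
    rw [hruns]; exact hdperm.map _
  have hmemiff : ∀ v : Int, v ∈ counts ↔ v ∈ runs := by
    intro v
    rw [hcounts, pv_mem_map_dedup t _ v, ← hrp.mem_iff]
  have hrcount : ∀ v : Int, runs.count v
      = ((PySem.List.dedup t).map (fun c => ((t.count c : Nat) : Int))).count v :=
    fun v => hrp.count_eq v
  have hcnt2a : counts.count 2 = 4 ↔ runs.count 2 = 2 := by
    rw [hcounts, hrcount 2]
    have h2 := pv_count_counts t 2
    norm_num at h2 ⊢
    rw [h2]
    omega
  have hcnt2b : counts.count 2 = 2 ↔ runs.count 2 = 1 := by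
    rw [hcounts, hrcount 2]
    have h2 := pv_count_counts t 2
    norm_num at h2 ⊢
    rw [h2]
    omega
  have hcnt1 : counts.count 1 = 5 ↔ runs.count 1 = 5 := by
    rw [hcounts, hrcount 1]
    have h1 := pv_count_counts t 1
    norm_num at h1 ⊢
    rw [h1]
  have hmax : PySem.List.max? counts (fun x => x) = PySem.List.max? runs (fun x => x) :=
    pv_max?_congr _ _ hmemiff
  have htne : t ≠ [] := by
    rw [ht]; exact fun hc => hne (List.map_eq_nil_iff.mp hc)
  cases hm : PySem.List.max? counts (fun x => x) with
  | none =>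
    rw [PySem.List.max?_eq_none_iff, hcounts, List.map_eq_nil_iff] at hm
    exact absurd hm htne
  | some m =>
    rw [hmax] at hm
    rw [hm]
    have b3 : decide ((3:Int) ∈ runs) = decide ((3:Int) ∈ counts) := by
      rw [decide_eq_decide]; exact (hmemiff 3).symm
    have b2 : decide ((2:Int) ∈ runs) = decide ((2:Int) ∈ counts) := by
      rw [decide_eq_decide]; exact (hmemiff 2).symm
    have bc4 : decide (runs.count 2 = 2) = decide (counts.count 2 = 4) := by
      rw [decide_eq_decide]; exact hcnt2a.symm
    have bc2 : decide (runs.count 2 = 1) = decide (counts.count 2 = 2) := by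
      rw [decide_eq_decide]; exact hcnt2b.symm
    have bc1 : decide (runs.count 1 = 5) = decide (counts.count 1 = 5) := by
      rw [decide_eq_decide]; exact hcnt1.symm
    rw [b3, b2, bc4, bc2, bc1]
    by_cases h1 : m = 5 <;> by_cases h2 : m = 4 <;>
      by_cases h3 : (3:Int) ∈ counts <;> by_cases h4 : (2:Int) ∈ counts <;>
      by_cases hc4 : counts.count 2 = 4 <;> by_cases hc2 : counts.count 2 = 2 <;>
      by_cases hc1 : counts.count 1 = 5 <;>
      simp [h1, h2, h3, h4, hc4, hc2, hc1, List.find?]
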